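-- pv_equiv track=rewrite | github.com/danhorner/nbexport | src/nbexport/nbexport.py | split_metadata
-- ===== SOURCE A (Python) =====
-- def split_metadata(code):
--     """
--     Remove the metadata from the top of a code cell
--     """
--     lines = code.splitlines()
--     meta_lines = []
--     rest_lines = []
--     for num,line in enumerate(lines):
--         if line.startswith("#|"):
--             meta_lines.append(line[2:])
--         else:
--             rest_lines = lines[num:]
--             break
--     return meta_lines, '\n'.join(rest_lines)
-- ===== SOURCE B (Python) =====
-- def split_metadata(code):
--     """
--     Remove the metadata from the top of a code cell
--     """
--     meta = []
--     pos = 0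
--     n = len(code)
--     while code.startswith("#|", pos):
--         end = pos + 2
--         while end < n and code[end] != '\n' and code[end] != '\r':
--             end += 1
--         meta.append(code[pos + 2:end])
--         if code.startswith('\r\n', end):
--             end += 2
--         elif end < n:
--             end += 1
--         pos = end
--     return meta, '\n'.join(code[pos:].splitlines())
-- ===== Notes on version B (the rewrite author's own statement) =====
-- stated objective: alternative
-- what changed: B scans the raw string with a cursor, parsing each leading metadata line char-by-char up to its line break (handling \n, \r and \r\n itself) and splitlines-joining only the remaining tail, instead of A's splitlines-first loop over the whole line list with an indexed break and slice.
import Mathlib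
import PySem

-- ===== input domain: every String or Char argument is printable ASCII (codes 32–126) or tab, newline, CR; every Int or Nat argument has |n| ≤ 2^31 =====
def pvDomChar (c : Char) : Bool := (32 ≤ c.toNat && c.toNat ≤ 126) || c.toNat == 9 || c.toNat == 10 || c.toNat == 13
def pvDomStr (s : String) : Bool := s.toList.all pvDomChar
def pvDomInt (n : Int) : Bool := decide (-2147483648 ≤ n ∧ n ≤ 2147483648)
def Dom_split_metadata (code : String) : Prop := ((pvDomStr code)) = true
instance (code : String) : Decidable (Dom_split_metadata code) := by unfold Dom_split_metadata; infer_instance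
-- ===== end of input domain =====

-- B scans the raw string with a cursor, parsing each leading '#|' line up to its own line break
-- and splitlines-joining only the tail; A splits the whole string into lines first and loops over
-- them with an indexed break. Same cost; a different decomposition.

-- ===== PORT A =====
-- A's for-loop with enumerate and break: the remaining suffix at index num is lines[num:],
-- so the loop is ported as structural recursion carrying (accumulator, remaining lines).
def split_metadata_loop (rest : List String) (acc : List String) : List String × List String :=
  match rest with
  | [] => (acc, [])                                 -- loop ends without break: rest_lines stays []
  | l :: ls =>
    if PySem.Str.startswith l "#|" then
      split_metadata_loop ls (acc ++ [PySem.Str.slice l (some 2) none])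
    else
      (acc, l :: ls)                                -- break: rest_lines = lines[num:]

def split_metadata (code : String) : List String × String :=
  let lines := PySem.Str.splitlines code
  let res := split_metadata_loop lines []
  (res.1, PySem.Str.join "\n" res.2)

-- ===== PORT B =====
-- Source B's inner scan `while end < n and code[end] != '\n' and code[end] != '\r'` is the
-- takeWhile/dropWhile of this predicate over the suffix at the cursor.
def pvNB (c : Char) : Bool := !(c == '\n' || c == '\r')

-- Source B's break skipping: `if code.startswith('\r\n', end): end += 2 elif end < n: end += 1`
def pvSkipBreak : List Char → List Char
  | '\r' :: '\n' :: t => t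
  | _ :: t => t
  | [] => []

-- needed by pvAltGo's termination proof
theorem pvSkipBreak_length_le (xs : List Char) : (pvSkipBreak xs).length ≤ xs.length := by
  match xs with
  | '\r' :: '\n' :: t => simp [pvSkipBreak]; omega
  | [] => simp [pvSkipBreak]
  | c :: t =>
    cases t with
    | nil => cases hc : (c == '\r') <;> simp_all [pvSkipBreak]
    | cons d t' =>
      by_cases hc : c = '\r' <;> by_cases hd : d = '\n' <;> simp_all [pvSkipBreak] <;> omega

-- the outer `while code.startswith('#|', pos)` loop; the cursor position is kept as the
-- remaining suffix of the character list
def pvAltGo (cs : List Char) (ms : List (List Char)) : List (List Char) × List Char :=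
  if h : PySem.Chars.startswith cs ['#', '|'] then
    let body := (cs.drop 2).takeWhile pvNB
    let rest := pvSkipBreak ((cs.drop 2).dropWhile pvNB)
    pvAltGo rest (ms ++ [body])
  else
    (ms, cs)
termination_by cs.length
decreasing_by
  have h2 : 2 ≤ cs.length := by
    rw [PySem.Chars.startswith_iff] at h
    have := h.length_le; simpa using this
  have := pvSkipBreak_length_le ((cs.drop 2).dropWhile pvNB)
  have := List.length_dropWhile_le (p := pvNB) (l := cs.drop 2)
  simp only [List.length_drop] at *
  omega

def split_metadata_alt (code : String) : List String × String :=
  let res := pvAltGo code.toList []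
  (res.1.map String.ofList,
   String.ofList (PySem.Chars.join ['\n'] (PySem.Chars.splitlines res.2)))

-- ===== PRECONDITION & SPEC =====
def Spec_split_metadata (code : String) (out : List String × String) : Prop := out = split_metadata_alt code
instance (code : String) (out : List String × String) : Decidable (Spec_split_metadata code out) := by unfold Spec_split_metadata; infer_instance

-- ===== CLAIM (what is proved, stated in full; the proofs are below) =====
def Claim_equal_split_metadata : Prop := ∀ (code : String), Dom_split_metadata code → Spec_split_metadata code (split_metadata code)

-- ===== LEMMAS AND PROOFS =====

def pvPredL (l : List Char) : Bool := PySem.Chars.startswith l ['#', '|']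

theorem pvSkipBreak_cons (c : Char) (rest : List Char)
    (h : ¬(c = '\x0d' ∧ ∃ t, rest = '\n' :: t)) : pvSkipBreak (c :: rest) = rest := by
  rw [pvSkipBreak.eq_def]
  split
  · rename_i heq; injection heq with h1 h2; exact absurd ⟨h1, by exact ⟨_, h2⟩⟩ h
  · rename_i hx heq; injection heq with h1 h2; exact h2.symm
  · rename_i heq; simp at heq

theorem pvSkipBreak_sublist (xs : List Char) : (pvSkipBreak xs).Sublist xs := by
  match xs with
  | '\r' :: '\n' :: t => simp [pvSkipBreak]
  | [] => simp [pvSkipBreak]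
  | c :: t =>
    cases t with
    | nil => cases hc : (c == '\r') <;> simp_all [pvSkipBreak]
    | cons d t' =>
      by_cases hc : c = '\r' <;> by_cases hd : d = '\n' <;> simp_all [pvSkipBreak]

theorem pvSublist_dom {xs ys : List Char} (h : xs.Sublist ys)
    (hdom : ∀ c ∈ ys, pvDomChar c = true) : ∀ c ∈ xs, pvDomChar c = true :=
  fun c hc => hdom c (h.mem hc)

theorem char_eq_iff_toNat (c d : Char) : c = d ↔ c.toNat = d.toNat := by
  constructor
  · rintro rfl; rfl
  · intro h; exact Char.ext (UInt32.toNat_inj.mp h)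

-- within the domain, the only splitlines break characters are '\n' and '\r'
theorem pvIsB_dom (isB : Char → Bool)
    (hspec : isB = fun c =>
      have n := c.toNat
      decide (n = 10) || decide (n = 13) || decide (n = 11) || decide (n = 12) ||
        decide (n = 28) || decide (n = 29) || decide (n = 30) || decide (n = 133) ||
        decide (n = 8232) || decide (n = 8233))
    (c : Char) (hc : pvDomChar c = true) : isB c = !pvNB c := by
  subst hspec
  simp only [pvDomChar, Bool.or_eq_true, Bool.and_eq_true, decide_eq_true_eq, beq_iff_eq] at hc
  apply Bool.eq_iff_iff.mpr
  simp only [pvNB, Bool.not_not, Bool.or_eq_true, beq_iff_eq, char_eq_iff_toNat,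
    decide_eq_true_eq, show ('\n').toNat = 10 from rfl, show ('\x0d').toNat = 13 from rfl]
  omega

-- the accumulator of splitlines.go only ever collects finished lines, reversed
theorem pv_go_acc (isB : Char → Bool) (cs : List Char) :
    ∀ cur acc, PySem.Chars.splitlines.go isB cs cur acc
      = acc.reverse ++ PySem.Chars.splitlines.go isB cs cur [] := by
  suffices h : ∀ n (cs : List Char), cs.length ≤ n → ∀ cur acc,
      PySem.Chars.splitlines.go isB cs cur acc
        = acc.reverse ++ PySem.Chars.splitlines.go isB cs cur [] from
    fun cur acc => h cs.length cs le_rfl cur acc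
  intro n
  induction n with
  | zero =>
    intro cs hlen cur acc
    have : cs = [] := by cases cs <;> simp_all
    subst this
    rw [PySem.Chars.splitlines.go.eq_1, PySem.Chars.splitlines.go.eq_1]
    by_cases h : cur.isEmpty <;> simp [h]
  | succ n ih =>
    intro cs hlen cur acc
    cases cs with
    | nil =>
      rw [PySem.Chars.splitlines.go.eq_1, PySem.Chars.splitlines.go.eq_1]
      by_cases h : cur.isEmpty <;> simp [h]
    | cons c rest =>
      by_cases hcr : c = '\x0d' ∧ ∃ t, rest = '\n' :: t
      · obtain ⟨rfl, t, rfl⟩ := hcr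
        rw [PySem.Chars.splitlines.go.eq_2, PySem.Chars.splitlines.go.eq_2,
          ih t (by simp at hlen; omega) [] (cur.reverse :: acc),
          ih t (by simp at hlen; omega) [] [cur.reverse]]
        simp
      · have hex : ∀ (t : List Char), c = '\x0d' → rest = '\n' :: t → False :=
          fun t h1 h2 => hcr ⟨h1, t, h2⟩
        rw [PySem.Chars.splitlines.go.eq_3 isB cur acc c rest hex,
          PySem.Chars.splitlines.go.eq_3 isB cur [] c rest hex]
        have hr : rest.length ≤ n := by simp at hlen; omega
        by_cases hb : isB c = true
        · simp only [hb, if_true]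
          rw [ih rest hr [] (cur.reverse :: acc), ih rest hr [] [cur.reverse]]
          simp
        · simp only [hb]
          exact ih rest hr (c :: cur) acc

-- one step of splitlines.go on a Dom string: the first line and the rest after its break
theorem pv_go_line (isB : Char → Bool)
    (hB : ∀ c, pvDomChar c = true → isB c = !pvNB c) :
    ∀ (cs : List Char), cs ≠ [] → (∀ c ∈ cs, pvDomChar c = true) →
    ∀ cur, PySem.Chars.splitlines.go isB cs cur []
      = (cur.reverse ++ cs.takeWhile pvNB)
        :: PySem.Chars.splitlines.go isB (pvSkipBreak (cs.dropWhile pvNB)) [] [] := by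
  suffices h : ∀ n (cs : List Char), cs.length ≤ n → cs ≠ [] →
      (∀ c ∈ cs, pvDomChar c = true) → ∀ cur,
      PySem.Chars.splitlines.go isB cs cur []
        = (cur.reverse ++ cs.takeWhile pvNB)
          :: PySem.Chars.splitlines.go isB (pvSkipBreak (cs.dropWhile pvNB)) [] [] from
    fun cs hne hdom cur => h cs.length cs le_rfl hne hdom cur
  intro n
  induction n with
  | zero => intro cs hlen hne _ _; cases cs <;> simp_all
  | succ n ih =>
    intro cs hlen hne hdom cur
    cases cs with
    | nil => exact absurd rfl hne
    | cons c rest =>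
      have hc : isB c = !pvNB c := hB c (hdom c (by simp))
      by_cases hcr : c = '\x0d' ∧ ∃ t, rest = '\n' :: t
      · obtain ⟨rfl, t, rfl⟩ := hcr
        rw [PySem.Chars.splitlines.go.eq_2,
          pv_go_acc isB t [] [cur.reverse]]
        have hnb : pvNB '\x0d' = false := by decide
        simp [List.takeWhile_cons, List.dropWhile_cons, hnb, pvSkipBreak]
      · have hex : ∀ (t : List Char), c = '\x0d' → rest = '\n' :: t → False :=
          fun t h1 h2 => hcr ⟨h1, t, h2⟩
        rw [PySem.Chars.splitlines.go.eq_3 isB cur [] c rest hex]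
        by_cases hnb : pvNB c = true
        · -- ordinary character: goes into the current line
          rw [hc, hnb]
          simp only [Bool.not_true, Bool.false_eq_true, if_false]
          rw [List.takeWhile_cons, List.dropWhile_cons]
          simp only [hnb, if_true]
          by_cases hrest : rest = []
          · subst hrest
            rw [PySem.Chars.splitlines.go.eq_1]
            simp [pvSkipBreak, PySem.Chars.splitlines.go]
          · rw [ih rest (by simp at hlen; omega) hrest
                (fun x hx => hdom x (by simp [hx])) (c :: cur)]
            simp
        · -- break character: the line ends here
          have hnb' : pvNB c = false := by simpa using hnb
          simp only [hc, hnb', Bool.not_false, if_true]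
          rw [pv_go_acc isB rest [] [cur.reverse]]
          rw [List.takeWhile_cons]
          simp [hnb', pvSkipBreak_cons c rest hcr]

-- head-line characterisation of splitlines on the domain
theorem pv_splitlines_cons (cs : List Char) (hne : cs ≠ [])
    (hdom : ∀ c ∈ cs, pvDomChar c = true) :
    PySem.Chars.splitlines cs
      = (cs.takeWhile pvNB) :: PySem.Chars.splitlines (pvSkipBreak (cs.dropWhile pvNB)) := by
  show PySem.Chars.splitlines.go _ cs [] []
    = (cs.takeWhile pvNB) :: PySem.Chars.splitlines.go _ (pvSkipBreak (cs.dropWhile pvNB)) [] []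
  rw [pv_go_line _ (pvIsB_dom _ rfl) cs hne hdom []]
  simp

-- main invariant: pvAltGo computes exactly the takeWhile/dropWhile decomposition of splitlines
theorem pvAltGo_spec (cs : List Char) (hdom : ∀ c ∈ cs, pvDomChar c = true)
    (ms : List (List Char)) :
    (pvAltGo cs ms).1
        = ms ++ ((PySem.Chars.splitlines cs).takeWhile pvPredL).map (List.drop 2)
    ∧ PySem.Chars.splitlines (pvAltGo cs ms).2
        = (PySem.Chars.splitlines cs).dropWhile pvPredL := by
  suffices h : ∀ n (cs : List Char), cs.length ≤ n → (∀ c ∈ cs, pvDomChar c = true) →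
      ∀ ms : List (List Char),
      (pvAltGo cs ms).1
          = ms ++ ((PySem.Chars.splitlines cs).takeWhile pvPredL).map (List.drop 2)
      ∧ PySem.Chars.splitlines (pvAltGo cs ms).2
          = (PySem.Chars.splitlines cs).dropWhile pvPredL from
    h cs.length cs le_rfl hdom ms
  clear hdom ms cs
  intro n
  induction n with
  | zero =>
    intro cs hlen _ ms
    have : cs = [] := by cases cs <;> simp_all
    subst this
    rw [pvAltGo]
    simp [PySem.Chars.startswith, PySem.Chars.splitlines, PySem.Chars.splitlines.go]
  | succ n ih =>
    intro cs hlen hdom ms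
    rw [pvAltGo]
    by_cases hsw : PySem.Chars.startswith cs ['#', '|'] = true
    · -- cs = '#' :: '|' :: t  (a metadata line is at the cursor)
      obtain ⟨t, rfl⟩ : ∃ t, cs = '#' :: '|' :: t := by
        rw [PySem.Chars.startswith_iff] at hsw
        obtain ⟨t, ht⟩ := hsw
        exact ⟨t, ht.symm⟩
      simp only [hsw, dif_pos]
      have hline := pv_splitlines_cons ('#' :: '|' :: t) (by simp) hdom
      have htw : List.takeWhile pvNB ('#' :: '|' :: t) = '#' :: '|' :: t.takeWhile pvNB := by
        simp [List.takeWhile_cons, show pvNB '#' = true from by decide,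
          show pvNB '|' = true from by decide]
      have hdw : List.dropWhile pvNB ('#' :: '|' :: t) = t.dropWhile pvNB := by
        simp [List.dropWhile_cons, show pvNB '#' = true from by decide,
          show pvNB '|' = true from by decide]
      rw [htw, hdw] at hline
      have hpred : pvPredL ('#' :: '|' :: t.takeWhile pvNB) = true := by
        simp [pvPredL, PySem.Chars.startswith, List.isPrefixOf]
      have hrest_sub : (pvSkipBreak (t.dropWhile pvNB)).Sublist ('#' :: '|' :: t) :=
        ((pvSkipBreak_sublist _).trans (List.dropWhile_sublist _)).trans
          ((List.sublist_cons_self _ _).trans (List.sublist_cons_self _ _))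
      have hlen' : (pvSkipBreak (t.dropWhile pvNB)).length ≤ n := by
        have h1 := pvSkipBreak_length_le (t.dropWhile pvNB)
        have h2 := List.length_dropWhile_le (p := pvNB) (l := t)
        simp at hlen; omega
      obtain ⟨ih1, ih2⟩ := ih (pvSkipBreak (t.dropWhile pvNB)) hlen'
        (pvSublist_dom hrest_sub hdom) (ms ++ [List.takeWhile pvNB t])
      simp only [List.drop_succ_cons, List.drop_zero]
      refine ⟨?_, ?_⟩
      · rw [ih1, hline]
        rw [List.takeWhile_cons_of_pos (by simpa using hpred)]
        simp
      · rw [ih2, hline]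
        rw [List.dropWhile_cons_of_pos (by simpa using hpred)]
    · -- no metadata line at the cursor: the loop stops
      rw [dif_neg hsw]
      cases cs with
      | nil =>
        constructor <;> simp [show PySem.Chars.splitlines [] = [] from rfl]
      | cons c rest =>
        rw [pv_splitlines_cons (c :: rest) (by simp) hdom]
        have hp : pvPredL ((c :: rest).takeWhile pvNB) = false := by
          by_contra hne'
          have habs : pvPredL ((c :: rest).takeWhile pvNB) = true := by simpa using hne'
          apply hsw
          rw [pvPredL, PySem.Chars.startswith_iff] at habs
          rw [PySem.Chars.startswith_iff]
          exact habs.trans (List.takeWhile_prefix _)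
        rw [List.takeWhile_cons_of_neg (p := pvPredL) (by simp [hp]),
          List.dropWhile_cons_of_neg (p := pvPredL) (by simp [hp])]
        exact ⟨by simp, rfl⟩

-- A's loop computes takeWhile/dropWhile over the line list
theorem split_metadata_loop_eq (rest acc : List String) :
    split_metadata_loop rest acc =
      (acc ++ (rest.takeWhile (fun l => PySem.Str.startswith l "#|")).map
        (fun l => PySem.Str.slice l (some 2) none),
       rest.dropWhile (fun l => PySem.Str.startswith l "#|")) := by
  induction rest generalizing acc with
  | nil => simp [split_metadata_loop]
  | cons l ls ih =>
    by_cases h : PySem.Chars.startswith l.toList ['#', '|'] = true <;>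
      simp [split_metadata_loop, h, ih]

theorem pv_str_splitlines (code : String) :
    PySem.Str.splitlines code = (PySem.Chars.splitlines code.toList).map String.ofList := by
  rw [← PySem.Str.splitlines_map_toList, List.map_map]
  simp [Function.comp_def, String.ofList_toList]

theorem pv_slice_two (l : List Char) :
    PySem.Str.slice (String.ofList l) (some 2) none = String.ofList (l.drop 2) := by
  calc PySem.Str.slice (String.ofList l) (some 2) none
      = String.ofList ((PySem.Str.slice (String.ofList l) (some 2) none).toList) :=
        (String.ofList_toList (s := _)).symm
    _ = String.ofList (l.drop 2) := by
        rw [PySem.Str.toList_slice]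
        simp [PySem.Chars.slice_eq_listSlice, PySem.List.slice_from (xs := l) (a := 2) (by norm_num)]

theorem pv_join_map (X : List (List Char)) :
    PySem.Str.join "\n" (X.map String.ofList)
      = String.ofList (PySem.Chars.join ['\n'] X) := by
  calc PySem.Str.join "\n" (X.map String.ofList)
      = String.ofList ((PySem.Str.join "\n" (X.map String.ofList)).toList) :=
        (String.ofList_toList (s := _)).symm
    _ = String.ofList (PySem.Chars.join ['\n'] X) := by
        rw [PySem.Str.toList_join]
        simp [List.map_map, Function.comp_def, String.toList_ofList,
          show ("\n").toList = ['\n'] from rfl]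

theorem split_metadata_eq_alt (code : String) (hdom : pvDomStr code = true) :
    split_metadata code = split_metadata_alt code := by
  have hdom' : ∀ c ∈ code.toList, pvDomChar c = true := by
    simpa [pvDomStr, List.all_eq_true] using hdom
  obtain ⟨h1, h2⟩ := pvAltGo_spec code.toList hdom' []
  show ((split_metadata_loop (PySem.Str.splitlines code) []).1,
        PySem.Str.join "\n" (split_metadata_loop (PySem.Str.splitlines code) []).2)
      = ((pvAltGo code.toList []).1.map String.ofList,
         String.ofList (PySem.Chars.join ['\n'] (PySem.Chars.splitlines (pvAltGo code.toList []).2)))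
  rw [split_metadata_loop_eq, pv_str_splitlines]
  rw [List.takeWhile_map, List.dropWhile_map]
  have hpred : ((fun l => PySem.Str.startswith l "#|") ∘ String.ofList) = pvPredL := by
    funext l
    simp [Function.comp, PySem.Str.startswith_eq, pvPredL, show ("#|").toList = ['#','|'] from rfl]
  rw [hpred]
  refine Prod.ext ?_ ?_
  · -- first components
    simp only [h1, List.nil_append, List.map_map]
    congr 1
    funext l
    exact pv_slice_two l
  · -- second components
    simp only [h2, pv_join_map]

-- ===== VERDICT (by name: the statement is the Claim_ definition above) =====
theorem split_metadata_spec : Claim_equal_split_metadata := by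
  intro code hdom
  exact split_metadata_eq_alt code hdom
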